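-- pv_equiv track=rewrite | github.com/pypi-data/pypi-mirror-391 | packages/multiple-minimum-monte-carlo/multiple_minimum_monte_carlo-0.0.8-py3-none-any.whl/multiple_minimum_monte_carlo/multiproc.py | batch_dicts
-- ===== SOURCE A (Python) =====
-- from typing import List, Dict, Callable
-- import math
--
-- def batch_dicts(dicts: List[Dict], num_workers: int) -> List[List[Dict]]:
--     """
--     Batch a list of dictionaries into a list of lists of dictionaries, and add a batch number to each dictionary
--
--     Args:
--         dicts (list): list of dictionaries
--         num_workers (int): number of workers
--
--     Returns:
--         batched_dicts (list): list of lists of dictionaries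
--     """
--     batch_size = math.ceil(len(dicts) / num_workers)
--     if batch_size == 0:
--         batch_size = 1
--     batched_dicts = []
--     # Batch the dictionaries and add a batch number to each dictionary
--     start_index = 0
--     for i in range(num_workers):
--         if start_index + batch_size > len(dicts):
--             for d in dicts[start_index:]:
--                 d["batch"] = i
--             batched_dicts.append(dicts[start_index:])
--         else:
--             for d in dicts[start_index : start_index + batch_size]:
--                 d["batch"] = i
--             batched_dicts.append(dicts[start_index : start_index + batch_size])
--             start_index += batch_size
--             # Recalculate the batch size to ensure that the last batch is not empty
--             number_of_items_in_batched_dicts = 0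
--             for dict in batched_dicts:
--                 number_of_items_in_batched_dicts += len(dict)
--             if i != num_workers - 1:
--                 batch_size = math.ceil(
--                     (len(dicts) - number_of_items_in_batched_dicts)
--                     / (num_workers - (i + 1))
--                 )
--     # Remove any empty lists
--     # batched_dicts = [x for x in batched_dicts if x != []]
--
--     return batched_dicts
-- ===== SOURCE B (Python) =====
-- def batch_dicts(dicts, num_workers):
--     """Same result as A: sizes come straight from divmod (first r groups get q+1, the rest q)."""
--     q, r = divmod(len(dicts), num_workers)
--     batched_dicts = []
--     start = 0
--     for i in range(num_workers):
--         size = q + 1 if i < r else q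
--         group = dicts[start:start + size]
--         for d in group:
--             d["batch"] = i
--         batched_dicts.append(group)
--         start += size
--     return batched_dicts
-- ===== Notes on version B (the rewrite author's own statement) =====
-- stated objective: faster
-- what changed: B computes q, r = divmod(len(dicts), num_workers) once and gives group i size q+1 if i < r else q, carving contiguous slices, instead of A's per-iteration ceil-recalculation of batch_size with an inner loop re-summing the lengths of all batches built so far.
import Mathlib
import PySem

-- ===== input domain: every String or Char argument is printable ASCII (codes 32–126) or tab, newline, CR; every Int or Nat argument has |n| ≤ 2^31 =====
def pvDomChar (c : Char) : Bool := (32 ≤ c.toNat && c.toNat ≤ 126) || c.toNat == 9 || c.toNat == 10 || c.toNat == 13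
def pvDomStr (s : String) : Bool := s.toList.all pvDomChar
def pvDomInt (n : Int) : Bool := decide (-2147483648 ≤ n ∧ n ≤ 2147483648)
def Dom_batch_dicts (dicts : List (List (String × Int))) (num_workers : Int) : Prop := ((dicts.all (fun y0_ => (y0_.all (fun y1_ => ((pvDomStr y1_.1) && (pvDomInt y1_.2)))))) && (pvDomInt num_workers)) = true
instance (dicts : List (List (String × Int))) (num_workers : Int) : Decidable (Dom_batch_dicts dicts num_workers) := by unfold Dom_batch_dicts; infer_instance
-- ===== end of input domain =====

-- B derives every batch size directly from divmod (first r groups get q+1, the rest q) instead of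
-- A's per-iteration ceil recalculation with an inner re-summing loop: objective 'simpler'.
-- Both Pythons mutate the shared dict objects (d["batch"] = i) identically; the theorems below are
-- about the RETURN value.

-- ===== PORT A =====
-- math.ceil(a / b) on ints: exact here because ceil(a/b) = -((-a) // b) and the float division in A
-- is exact enough on this domain (|a| ≤ list length, |b| ≤ 2^31, so n < 2^52)
def pvCeil (a b : Int) : Int := -(PySem.Int.floordiv (-a) b)

-- d["batch"] = i on a Python dict (overwrite in place, new key appends)
def pvSetBatch (d : List (String × Int)) (i : Int) : List (String × Int) :=
  (PySem.Dict.insert (PySem.Dict.mk d) "batch" i).items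

def batch_dicts (dicts : List (List (String × Int))) (num_workers : Int) : List (List (List (String × Int))) :=
  ((PySem.List.pyRange 0 num_workers 1).foldl
    (fun (s : Int × Int × List (List (List (String × Int)))) i =>
      if s.1 + s.2.1 > (dicts.length : Int) then
        (s.1, s.2.1, s.2.2 ++ [(PySem.List.slice dicts (some s.1) none).map (fun d => pvSetBatch d i)])
      else
        let acc' := s.2.2 ++ [(PySem.List.slice dicts (some s.1) (some (s.1 + s.2.1))).map (fun d => pvSetBatch d i)]
        let items := acc'.foldl (fun t b => t + (b.length : Int)) 0
        (s.1 + s.2.1,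
         if i ≠ num_workers - 1 then pvCeil ((dicts.length : Int) - items) (num_workers - (i + 1)) else s.2.1,
         acc'))
    (0,
     (if pvCeil (dicts.length : Int) num_workers = 0 then 1 else pvCeil (dicts.length : Int) num_workers),
     [])).2.2

-- ===== PORT B =====
-- q, r = divmod(len(dicts), num_workers); divmod = (floordiv, mod); num_workers = 0 (ZeroDivisionError) is excluded by Pre_
def batch_dicts_alt (dicts : List (List (String × Int))) (num_workers : Int) : List (List (List (String × Int))) :=
  let q := PySem.Int.floordiv (dicts.length : Int) num_workers
  let r := PySem.Int.mod (dicts.length : Int) num_workers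
  ((PySem.List.pyRange 0 num_workers 1).foldl
    (fun (s : Int × List (List (List (String × Int)))) i =>
      let size := if i < r then q + 1 else q
      (s.1 + size,
       s.2 ++ [(PySem.List.slice dicts (some s.1) (some (s.1 + size))).map (fun d => pvSetBatch d i)]))
    (0, [])).2

-- ===== PRECONDITION & SPEC =====
-- num_workers = 0 makes A raise ZeroDivisionError (math.ceil(len/0)); nothing else is excluded.
def Pre_batch_dicts (dicts : List (List (String × Int))) (num_workers : Int) : Prop := num_workers ≠ 0
instance (dicts : List (List (String × Int))) (num_workers : Int) : Decidable (Pre_batch_dicts dicts num_workers) := by unfold Pre_batch_dicts; infer_instance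
def pvWitness_batch_dicts : (List (List (String × Int))) × Int := ([[("a", 1)], [("b", 2)], [("c", 3)]], 2)

def Spec_batch_dicts (dicts : List (List (String × Int))) (num_workers : Int) (out : List (List (List (String × Int)))) : Prop := out = batch_dicts_alt dicts num_workers
instance (dicts : List (List (String × Int))) (num_workers : Int) (out : List (List (List (String × Int)))) : Decidable (Spec_batch_dicts dicts num_workers out) := by unfold Spec_batch_dicts; infer_instance

-- ===== CLAIM (what is proved, stated in full; the proofs are below) =====
def Claim_equal_batch_dicts : Prop := ∀ (dicts : List (List (String × Int))) (num_workers : Int), Dom_batch_dicts dicts num_workers → Pre_batch_dicts dicts num_workers → Spec_batch_dicts dicts num_workers (batch_dicts dicts num_workers)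

-- ===== LEMMAS AND PROOFS =====

-- the canonical result: group i starts at i*q + min i r and has size q+1 (i < r) or q
def pvStart (q r i : Int) : Int := i * q + min i r
def pvSize (q r i : Int) : Int := if i < r then q + 1 else q
def pvBatch (dicts : List (List (String × Int))) (q r i : Int) : List (List (String × Int)) :=
  (PySem.List.slice dicts (some (pvStart q r i)) (some (pvStart q r (i + 1)))).map (fun d => pvSetBatch d i)
def pvTail (dicts : List (List (String × Int))) (q r : Int) : Nat → Int → List (List (List (String × Int)))
  | 0, _ => []
  | k + 1, i => pvBatch dicts q r i :: pvTail dicts q r k (i + 1)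
-- batch size A carries into iteration i (the n = 0 special case is A's "if batch_size == 0: batch_size = 1")
def pvBS (q r i : Int) : Int := if q = 0 ∧ r = 0 then 1 else pvSize q r i

theorem pvStart_succ (q r i : Int) : pvStart q r (i + 1) = pvStart q r i + pvSize q r i := by
  have h : (i + 1) * q = i * q + q := by ring
  unfold pvStart pvSize; split_ifs with hh <;> omega

theorem pvSliceLen {α : Type} (xs : List α) {a b : Int} (h0 : 0 ≤ a) (hab : a ≤ b)
    (hb : b ≤ (xs.length : Int)) :
    (((PySem.List.slice xs (some a) (some b)).length : Int)) = b - a := by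
  rw [PySem.List.slice_of_nonneg xs h0 (h0.trans hab) (hab.trans hb) hb]
  simp; omega

theorem pvCeil_eq {a b c : Int} (hb : 0 < b) (h1 : (c - 1) * b < a) (h2 : a ≤ c * b) :
    pvCeil a b = c := by
  unfold pvCeil
  exact (PySem.Int.neg_floordiv_neg_eq_iff_of_pos hb).mpr ⟨h1, h2⟩

theorem pvCeil_step (q r w i : Int) (hq0 : 0 ≤ q) (hr0 : 0 ≤ r) (hrw : r < w) (hi : 0 ≤ i)
    (hiw : i + 1 < w) :
    pvCeil (q * w + r - pvStart q r (i + 1)) (w - (i + 1)) = pvSize q r (i + 1) := by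
  have e1 : q * w - (i + 1) * q = q * (w - (i + 1)) := by ring
  unfold pvStart pvSize
  split_ifs with h
  · refine pvCeil_eq (by omega) ?_ ?_
    · have e2 : (q + 1 - 1) * (w - (i + 1)) = q * (w - (i + 1)) := by ring
      omega
    · have e3 : (q + 1) * (w - (i + 1)) = q * (w - (i + 1)) + (w - (i + 1)) := by ring
      omega
  · refine pvCeil_eq (by omega) ?_ ?_
    · have e4 : (q - 1) * (w - (i + 1)) = q * (w - (i + 1)) - (w - (i + 1)) := by ring
      have e5 : 0 < w - (i + 1) := by omega
      omega
    · omega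

theorem pvStart_le (q r w i : Int) (hq0 : 0 ≤ q) (hr0 : 0 ≤ r) (hrw : r < w) (hi : 0 ≤ i)
    (hiw : i ≤ w) : pvStart q r i ≤ q * w + r := by
  have h1 : 0 ≤ (w - i) * q := mul_nonneg (by omega) hq0
  have h2 : (w - i) * q = q * w - i * q := by ring
  unfold pvStart; omega

theorem pvStart_nonneg (q r i : Int) (hq0 : 0 ≤ q) (hr0 : 0 ≤ r) (hi : 0 ≤ i) :
    0 ≤ pvStart q r i := by
  have h1 : 0 ≤ i * q := mul_nonneg hi hq0
  unfold pvStart; omega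

theorem pvSum_append (acc : List (List (List (String × Int)))) (b : List (List (String × Int))) :
    (acc ++ [b]).foldl (fun t c => t + (c.length : Int)) 0
      = acc.foldl (fun t c => t + (c.length : Int)) 0 + (b.length : Int) := by
  rw [List.foldl_append]; rfl

theorem foldB_spec (dicts : List (List (String × Int))) (w q r : Int)
    (hqr : (dicts.length : Int) = q * w + r) (hq0 : 0 ≤ q) (hr0 : 0 ≤ r) (hrw : r < w) :
    ∀ (fuel : Nat) (i : Int) (acc : List (List (List (String × Int)))),
      i + (fuel : Int) = w → 0 ≤ i →
      ((PySem.List.pyRange i w 1).foldl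
        (fun (s : Int × List (List (List (String × Int)))) j =>
          let size := if j < r then q + 1 else q
          (s.1 + size,
           s.2 ++ [(PySem.List.slice dicts (some s.1) (some (s.1 + size))).map (fun d => pvSetBatch d j)]))
        (pvStart q r i, acc)).2 = acc ++ pvTail dicts q r fuel i := by
  intro fuel
  induction fuel with
  | zero =>
      intro i acc hiw hi
      rw [PySem.List.pyRange_one_eq_nil (by omega : w ≤ i)]
      simp [pvTail]
  | succ k ih =>
      intro i acc hiw hi
      have hi' : i < w := by push_cast at hiw; omega
      rw [PySem.List.pyRange_one_cons hi', List.foldl_cons]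
      dsimp only
      have e : pvStart q r i + (if i < r then q + 1 else q) = pvStart q r (i + 1) := by
        rw [pvStart_succ]; rfl
      rw [e]
      have h2 := ih (i + 1) (acc ++ [pvBatch dicts q r i]) (by push_cast at hiw ⊢; omega) (by omega)
      simp only [pvBatch] at h2
      rw [h2]
      simp [pvTail, pvBatch]

theorem foldA_spec (dicts : List (List (String × Int))) (w q r : Int)
    (hqr : (dicts.length : Int) = q * w + r) (hq0 : 0 ≤ q) (hr0 : 0 ≤ r) (hrw : r < w) :
    ∀ (fuel : Nat) (i : Int) (bs : Int) (acc : List (List (List (String × Int)))),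
      i + (fuel : Int) = w → 0 ≤ i →
      acc.foldl (fun t c => t + (c.length : Int)) 0 = pvStart q r i →
      (fuel ≠ 0 → bs = pvBS q r i) →
      ((PySem.List.pyRange i w 1).foldl
        (fun (s : Int × Int × List (List (List (String × Int)))) j =>
          if s.1 + s.2.1 > (dicts.length : Int) then
            (s.1, s.2.1, s.2.2 ++ [(PySem.List.slice dicts (some s.1) none).map (fun d => pvSetBatch d j)])
          else
            let acc' := s.2.2 ++ [(PySem.List.slice dicts (some s.1) (some (s.1 + s.2.1))).map (fun d => pvSetBatch d j)]
            let items := acc'.foldl (fun t c => t + (c.length : Int)) 0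
            (s.1 + s.2.1,
             if j ≠ w - 1 then pvCeil ((dicts.length : Int) - items) (w - (j + 1)) else s.2.1,
             acc'))
        (pvStart q r i, bs, acc)).2.2 = acc ++ pvTail dicts q r fuel i := by
  intro fuel
  induction fuel with
  | zero =>
      intro i bs acc hiw hi hsum hbs
      rw [PySem.List.pyRange_one_eq_nil (by omega : w ≤ i)]
      simp [pvTail]
  | succ k ih =>
      intro i bs acc hiw hi hsum hbs
      have hi' : i < w := by push_cast at hiw; omega
      rw [hbs (by omega)]
      rw [PySem.List.pyRange_one_cons hi', List.foldl_cons]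
      by_cases hz : q = 0 ∧ r = 0
      · obtain ⟨hq, hr⟩ := hz
        subst hq hr
        have hd : dicts = [] := by
          have hlen : (dicts.length : Int) = 0 := by rw [hqr]; ring
          have : dicts.length = 0 := by omega
          exact List.length_eq_zero_iff.mp this
        have hst : ∀ j : Int, 0 ≤ j → pvStart 0 0 j = 0 := by
          intro j hj; unfold pvStart; omega
        have hbs1 : pvBS 0 0 i = 1 := by unfold pvBS; simp
        rw [hbs1]
        have hcond : pvStart 0 0 i + 1 > (dicts.length : Int) := by
          rw [hst i hi, hqr]; norm_num
        rw [if_pos hcond]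
        have h2 := ih (i + 1) 1 (acc ++ [[]])
          (by push_cast at hiw ⊢; omega) (by omega)
          (by rw [pvSum_append, hsum, hst i hi, hst (i + 1) (by omega)]; simp)
          (fun _ => by simp [pvBS])
        have hsl : (PySem.List.slice dicts (some (pvStart 0 0 i)) none).map
            (fun d => pvSetBatch d i) = ([] : List (List (String × Int))) := by
          subst hd; simp [PySem.List.slice]
        have hslB : pvBatch dicts 0 0 i = ([] : List (List (String × Int))) := by
          subst hd; simp [pvBatch, PySem.List.slice]
        rw [hsl]
        have hst2 : pvStart 0 0 (i + 1) = pvStart 0 0 i := by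
          rw [hst i hi, hst (i + 1) (by omega)]
        rw [hst2] at h2
        rw [h2]
        simp [pvTail, hslB]
      · have hbsz : pvBS q r i = pvSize q r i := by unfold pvBS; rw [if_neg hz]
        rw [hbsz]
        have hle : pvStart q r i + pvSize q r i ≤ (dicts.length : Int) := by
          rw [hqr, ← pvStart_succ]
          exact pvStart_le q r w (i + 1) hq0 hr0 hrw (by omega) (by push_cast at hiw; omega)
        dsimp only
        rw [if_neg (by omega)]
        have hsz0 : 0 ≤ pvSize q r i := by unfold pvSize; split_ifs <;> omega
        have hstn : 0 ≤ pvStart q r i := pvStart_nonneg q r i hq0 hr0 hi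
        have hitems : (acc ++ [(PySem.List.slice dicts (some (pvStart q r i))
              (some (pvStart q r i + pvSize q r i))).map (fun d => pvSetBatch d i)]).foldl
              (fun t c => t + (c.length : Int)) 0 = pvStart q r (i + 1) := by
          rw [pvSum_append, hsum]
          simp only [List.length_map]
          rw [pvSliceLen dicts hstn (by omega) hle]
          rw [pvStart_succ]; ring
        rw [hitems]
        have hbs' : (k : Int) ≠ 0 →
            (if i ≠ w - 1 then pvCeil ((dicts.length : Int) - pvStart q r (i + 1)) (w - (i + 1))
             else pvSize q r i) = pvBS q r (i + 1) := by
          intro hk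
          have hiw2 : i + 1 < w := by push_cast at hiw; omega
          rw [if_pos (by omega), hqr, pvCeil_step q r w i hq0 hr0 hrw hi hiw2]
          unfold pvBS; rw [if_neg hz]
        have h2 := ih (i + 1)
          (if i ≠ w - 1 then pvCeil ((dicts.length : Int) - pvStart q r (i + 1)) (w - (i + 1))
           else pvSize q r i)
          (acc ++ [(PySem.List.slice dicts (some (pvStart q r i))
              (some (pvStart q r i + pvSize q r i))).map (fun d => pvSetBatch d i)])
          (by push_cast at hiw ⊢; omega) (by omega) (by rw [hitems])
          (fun hk => hbs' (by exact_mod_cast Nat.cast_ne_zero.mpr hk))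
        rw [← pvStart_succ] at h2 ⊢
        rw [h2]
        simp [pvTail, pvBatch, pvStart_succ]

theorem pvCeil_init (n w : Int) (hw : 0 < w) (hn0 : 0 ≤ n) (hn : n = n / w * w + n % w) :
    (if pvCeil n w = 0 then 1 else pvCeil n w) = pvBS (n / w) (n % w) 0 := by
  have hq0 : 0 ≤ n / w := Int.ediv_nonneg hn0 hw.le
  have hr0 : 0 ≤ n % w := Int.emod_nonneg n (by omega)
  have hrw : n % w < w := Int.emod_lt_of_pos n hw
  by_cases hz : n / w = 0 ∧ n % w = 0
  · have hn0 : n = 0 := by obtain ⟨h1, h2⟩ := hz; rw [hn, h1, h2]; ring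
    have hc : pvCeil n w = 0 := by
      refine pvCeil_eq hw ?_ ?_ <;> rw [hn0] <;> simp <;> omega
    rw [if_pos hc]
    unfold pvBS; rw [if_pos hz]
  · have hc : pvCeil n w = pvSize (n / w) (n % w) 0 := by
      unfold pvSize
      by_cases hr : (0 : Int) < n % w
      · rw [if_pos hr]
        refine pvCeil_eq hw ?_ ?_
        · have e1 : (n / w + 1 - 1) * w = n / w * w := by ring
          omega
        · have e2 : (n / w + 1) * w = n / w * w + w := by ring
          omega
      · rw [if_neg hr]
        have hq1 : 1 ≤ n / w := by
          rcases (not_and_or.mp hz) with h | h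
          · omega
          · omega
        refine pvCeil_eq hw ?_ ?_
        · have e3 : (n / w - 1) * w = n / w * w - w := by ring
          omega
        · omega
    have hne : pvCeil n w ≠ 0 := by
      rw [hc]; unfold pvSize
      split_ifs with h
      · omega
      · rcases (not_and_or.mp hz) with h' | h' <;> omega
    rw [if_neg hne, hc]
    unfold pvBS; rw [if_neg hz]

-- ===== VERDICT (by name: the statement is the Claim_ definition above) =====
theorem batch_dicts_spec : Claim_equal_batch_dicts := by
  intro dicts w _ hw
  unfold Pre_batch_dicts at hw
  unfold Spec_batch_dicts
  by_cases hpos : 0 < w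
  · have hq0 : 0 ≤ (dicts.length : Int) / w :=
      Int.ediv_nonneg (Int.natCast_nonneg _) (le_of_lt hpos)
    have hr0 : 0 ≤ (dicts.length : Int) % w := Int.emod_nonneg _ (by omega)
    have hrw : (dicts.length : Int) % w < w := Int.emod_lt_of_pos _ hpos
    have hqr : (dicts.length : Int)
        = (dicts.length : Int) / w * w + (dicts.length : Int) % w := by
      have h1 := Int.mul_ediv_add_emod (dicts.length : Int) w
      have h2 : w * ((dicts.length : Int) / w) = (dicts.length : Int) / w * w := mul_comm _ _
      omega
    have hst0 : pvStart ((dicts.length : Int) / w) ((dicts.length : Int) % w) 0 = 0 := by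
      unfold pvStart; omega
    have hA := foldA_spec dicts w ((dicts.length : Int) / w) ((dicts.length : Int) % w)
      hqr hq0 hr0 hrw w.toNat 0
      (if pvCeil (dicts.length : Int) w = 0 then 1 else pvCeil (dicts.length : Int) w) []
      (by omega) (le_refl 0) (by rw [hst0]; rfl)
      (fun _ => pvCeil_init (dicts.length : Int) w hpos (Int.natCast_nonneg _) hqr)
    have hB := foldB_spec dicts w ((dicts.length : Int) / w) ((dicts.length : Int) % w)
      hqr hq0 hr0 hrw w.toNat 0 []
      (by omega) (le_refl 0)
    rw [hst0] at hA hB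
    unfold batch_dicts batch_dicts_alt
    simp only [PySem.Int.floordiv_eq_ediv_of_pos hpos, PySem.Int.mod_eq_emod_of_pos hpos]
    rw [hA, hB]
  · unfold batch_dicts batch_dicts_alt
    rw [PySem.List.pyRange_one_eq_nil (show w ≤ 0 by omega)]
    simp
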